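-- pv_equiv track=rewrite | github.com/zjfls/vehiclegame | core/map_config_manager.py | get_dependency_chain
-- ===== SOURCE A (Python) =====
-- from typing import Any, Dict, List, Optional
--
-- def get_dependency_chain(module_name: str) -> List[str]:
--     """获取模块的依赖链（从根到当前）"""
--     chain = []
--     current = module_name
--
--     # 简单实现：硬编码依赖关系
--     deps = {
--         "1_terrain": None,
--         "2_colors": "1_terrain",
--         "3_track": "1_terrain",
--         "4_scenery": "1_terrain"
--     }
--
--     while current:
--         chain.insert(0, current)
--         current = deps.get(current)
--
--     return chain
-- ===== SOURCE B (Python) =====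
-- def get_dependency_chain(module_name: str):
--     """获取模块的依赖链（从根到当前）"""
--     # Full chains precomputed once (the tiny hardcoded hierarchy admits a closed table);
--     # an unknown truthy module is its own one-element chain, a falsy name has no chain.
--     chains = {
--         "1_terrain": ["1_terrain"],
--         "2_colors": ["1_terrain", "2_colors"],
--         "3_track": ["1_terrain", "3_track"],
--         "4_scenery": ["1_terrain", "4_scenery"],
--     }
--     if not module_name:
--         return []
--     return chains.get(module_name, [module_name])
-- ===== Notes on version B (the rewrite author's own statement) =====
-- stated objective: simpler
-- what changed: Replaces the parent-pointer while loop with chain.insert(0, ...) by a single lookup in a precomputed table of full chains (unknown truthy names map to a one-element chain), removing the loop entirely.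
import Mathlib
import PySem

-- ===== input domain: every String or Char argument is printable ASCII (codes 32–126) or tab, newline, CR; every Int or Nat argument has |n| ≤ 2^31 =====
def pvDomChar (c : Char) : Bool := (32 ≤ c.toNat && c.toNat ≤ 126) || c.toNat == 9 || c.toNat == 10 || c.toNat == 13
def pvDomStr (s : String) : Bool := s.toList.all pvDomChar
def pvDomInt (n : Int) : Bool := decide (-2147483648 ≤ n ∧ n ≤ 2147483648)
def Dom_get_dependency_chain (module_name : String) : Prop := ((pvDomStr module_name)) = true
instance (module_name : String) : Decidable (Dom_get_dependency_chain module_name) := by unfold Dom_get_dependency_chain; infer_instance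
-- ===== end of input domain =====

-- B replaces A's parent-pointer while loop (with insert(0)) by one lookup in a
-- precomputed table of full chains; objective: simpler, no loop at all.

-- ===== PORT A =====
-- the hardcoded `deps` dict of A (values are Optional[str])
def pvDepsA : PySem.Dict String (Option String) :=
  PySem.Dict.ofList [("1_terrain", none), ("2_colors", some "1_terrain"),
                     ("3_track", some "1_terrain"), ("4_scenery", some "1_terrain")]

-- termination measure for the parent-pointer walk: every deps value is none or "1_terrain"
def pvRank : Option String → Nat
  | none => 0
  | some s => if s = "" then 0 else if s = "1_terrain" then 1 else 2

theorem pvNext_cases_A (s : String) :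
    (pvDepsA.get? s).getD none = none ∨ (pvDepsA.get? s).getD none = some "1_terrain" := by
  simp [pvDepsA, PySem.Dict.ofList, PySem.Dict.update, PySem.Dict.get?_insert,
        PySem.Dict.get?_empty]
  split_ifs <;> simp

theorem pvNext_lt_A (s : String) (h : ¬ s = "") :
    pvRank ((pvDepsA.get? s).getD none) < pvRank (some s) := by
  by_cases h1 : s = "1_terrain"
  · subst h1; decide
  · rcases pvNext_cases_A s with h2 | h2 <;> simp [h2, pvRank, h, h1]

-- the `while current:` loop of A; `chain.insert(0, current)` is prepending
def pvLoopA : Option String → List String → List String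
  | none, chain => chain
  | some s, chain =>
      if h : s = "" then chain
      else pvLoopA ((pvDepsA.get? s).getD none) (s :: chain)
termination_by c _ => pvRank c
decreasing_by exact pvNext_lt_A s h

def get_dependency_chain (module_name : String) : List String :=
  pvLoopA (some module_name) []

-- ===== PORT B =====
-- B's precomputed table of complete chains
def pvChainsB : PySem.Dict String (List String) :=
  PySem.Dict.ofList [("1_terrain", ["1_terrain"]),
                     ("2_colors", ["1_terrain", "2_colors"]),
                     ("3_track", ["1_terrain", "3_track"]),
                     ("4_scenery", ["1_terrain", "4_scenery"])]

def get_dependency_chain_alt (module_name : String) : List String :=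
  if module_name = "" then []
  else (pvChainsB.get? module_name).getD [module_name]

-- ===== PRECONDITION & SPEC =====
def Spec_get_dependency_chain (module_name : String) (out : List String) : Prop := out = get_dependency_chain_alt module_name
instance (module_name : String) (out : List String) : Decidable (Spec_get_dependency_chain module_name out) := by unfold Spec_get_dependency_chain; infer_instance

-- ===== CLAIM =====
def Claim_equal_get_dependency_chain : Prop := ∀ (module_name : String), Dom_get_dependency_chain module_name → Spec_get_dependency_chain module_name (get_dependency_chain module_name)

-- ===== LEMMAS AND PROOFS =====
-- For a name that is none of the four keys, both dict lookups miss.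
theorem pvDepsA_get?_notkey (s : String) (h1 : s ≠ "1_terrain") (h2 : s ≠ "2_colors")
    (h3 : s ≠ "3_track") (h4 : s ≠ "4_scenery") : pvDepsA.get? s = none := by
  simp [pvDepsA, PySem.Dict.ofList, PySem.Dict.update, PySem.Dict.get?_insert,
        PySem.Dict.get?_empty, h1, h2, h3, h4]

theorem pvChainsB_get?_notkey (s : String) (h1 : s ≠ "1_terrain") (h2 : s ≠ "2_colors")
    (h3 : s ≠ "3_track") (h4 : s ≠ "4_scenery") : pvChainsB.get? s = none := by
  simp [pvChainsB, PySem.Dict.ofList, PySem.Dict.update, PySem.Dict.get?_insert,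
        PySem.Dict.get?_empty, h1, h2, h3, h4]

-- ===== VERDICT =====
theorem get_dependency_chain_spec : Claim_equal_get_dependency_chain := by
  intro m _
  unfold Spec_get_dependency_chain
  have ev : ∀ k, get_dependency_chain k = pvLoopA (some k) [] := fun _ => rfl
  by_cases h0 : m = ""
  · subst h0; simp [ev, pvLoopA, get_dependency_chain_alt]
  · by_cases h1 : m = "1_terrain"
    · subst h1
      simp [ev, pvLoopA, get_dependency_chain_alt, pvDepsA, pvChainsB,
            PySem.Dict.ofList, PySem.Dict.update, PySem.Dict.get?_insert, PySem.Dict.get?_empty]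
    · by_cases h2 : m = "2_colors"
      · subst h2
        simp [ev, pvLoopA, get_dependency_chain_alt, pvDepsA, pvChainsB,
              PySem.Dict.ofList, PySem.Dict.update, PySem.Dict.get?_insert, PySem.Dict.get?_empty]
      · by_cases h3 : m = "3_track"
        · subst h3
          simp [ev, pvLoopA, get_dependency_chain_alt, pvDepsA, pvChainsB,
                PySem.Dict.ofList, PySem.Dict.update, PySem.Dict.get?_insert, PySem.Dict.get?_empty]
        · by_cases h4 : m = "4_scenery"
          · subst h4
            simp [ev, pvLoopA, get_dependency_chain_alt, pvDepsA, pvChainsB,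
                  PySem.Dict.ofList, PySem.Dict.update, PySem.Dict.get?_insert, PySem.Dict.get?_empty]
          · unfold get_dependency_chain get_dependency_chain_alt
            rw [pvLoopA]
            simp only [h0, dite_false, pvDepsA_get?_notkey m h1 h2 h3 h4,
                       pvChainsB_get?_notkey m h1 h2 h3 h4]
            simp [pvLoopA]
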